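-- pv_equiv track=rewrite | github.com/k-dalgaard/macscan | code/macscan/mac-scan.py | convert_mac
-- ===== SOURCE A (Python) =====
-- def convert_mac(mac_address):
--     if str(mac_address).count(".",0,len(mac_address))==2 and len(mac_address)==14:
--         #Convert MAC from xxxx.xxxx.xxxx format to xx:xx:xx:xx:xx:xx format
--         mac_address=str(mac_address)
--         mac_address=mac_address.replace(".","")
--         count = 1
--         mac_address=list(mac_address)
--         while(count<14):
--             mac_address.insert(count+1,":")
--             count+=3
--     return (''.join(mac_address)).lower()
-- ===== SOURCE B (Python) =====
-- def convert_mac(mac_address):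
--     if str(mac_address).count(".", 0, len(mac_address)) == 2 and len(mac_address) == 14:
--         digits = str(mac_address).replace(".", "")
--         return ":".join(digits[i:i + 2] for i in range(0, len(digits), 2)).lower()
--     return ("".join(mac_address)).lower()
-- ===== Notes on version B (the rewrite author's own statement) =====
-- stated objective: idiomatic
-- what changed: The dot-format branch no longer mutates a character list by inserting separator characters at stride-3 indices in a while loop; B strips the dots and joins the six 2-character slices with the colon separator directly.
import Mathlib
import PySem

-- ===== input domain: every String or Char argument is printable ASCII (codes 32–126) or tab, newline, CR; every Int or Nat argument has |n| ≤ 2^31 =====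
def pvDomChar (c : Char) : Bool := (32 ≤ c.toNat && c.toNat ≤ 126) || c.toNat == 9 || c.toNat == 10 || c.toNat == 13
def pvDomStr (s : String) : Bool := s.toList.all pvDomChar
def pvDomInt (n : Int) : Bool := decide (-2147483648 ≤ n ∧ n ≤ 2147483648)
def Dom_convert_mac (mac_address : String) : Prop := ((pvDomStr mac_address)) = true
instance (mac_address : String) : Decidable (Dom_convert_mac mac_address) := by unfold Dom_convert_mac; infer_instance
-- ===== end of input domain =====

-- B rewrites the dot-format branch: instead of mutating a char list by inserting the separator char at
-- stride-3 indices in a while loop, it slices the dot-free string into 2-char pairs and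
-- joins them with the colon separator (objective: idiomatic). Guard and fall-through are unchanged.

-- ===== PORT A =====
-- the while loop: count = 1; while count < 14: mac.insert(count+1, ':'); count += 3
def convertMacLoopA (cs : List Char) (count : Int) : List Char :=
  if h : count < 14 then
    convertMacLoopA (PySem.List.insert cs (count + 1) ':') (count + 3)
  else cs
termination_by (14 - count).toNat
decreasing_by omega

def convert_mac (mac_address : String) : String :=
  let cs := mac_address.toList
  -- str(mac).count(".", 0, len(mac)) counts '.' in the slice mac[0:len(mac)]
  if PySem.Chars.count (PySem.Chars.slice cs (some 0) (some (cs.length : Int))) ['.'] = 2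
      ∧ cs.length = 14 then
    let noDots := PySem.Chars.replace cs ['.'] []
    String.ofList (PySem.Chars.lower (convertMacLoopA noDots 1))
  else
    -- ''.join(mac).lower() on a string is the string lowered
    String.ofList (PySem.Chars.lower cs)

-- ===== PORT B =====
def convert_mac_alt (mac_address : String) : String :=
  let cs := mac_address.toList
  if PySem.Chars.count (PySem.Chars.slice cs (some 0) (some (cs.length : Int))) ['.'] = 2
      ∧ cs.length = 14 then
    let digits := PySem.Chars.replace cs ['.'] []
    -- ":".join(digits[i:i+2] for i in range(0, len(digits), 2)).lower()
    String.ofList (PySem.Chars.lower (PySem.Chars.join [':']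
      ((PySem.List.pyRange 0 (digits.length : Int) 2).map
        (fun i => PySem.List.slice digits (some i) (some (i + 2))))))
  else
    String.ofList (PySem.Chars.lower cs)

-- ===== PRECONDITION & SPEC =====
def Spec_convert_mac (mac_address : String) (out : String) : Prop := out = convert_mac_alt mac_address
instance (mac_address : String) (out : String) : Decidable (Spec_convert_mac mac_address out) := by unfold Spec_convert_mac; infer_instance

-- ===== CLAIM (what is proved, stated in full; the proofs are below) =====
def Claim_equal_convert_mac : Prop := ∀ (mac_address : String), Dom_convert_mac mac_address → Spec_convert_mac mac_address (convert_mac mac_address)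

-- ===== LEMMAS AND PROOFS =====

-- single-character s.count: Chars.count cs [c] counts the occurrences of c
theorem count_go_single (c : Char) (cs : List Char) (acc fuel : Nat)
    (h : cs.length ≤ fuel) :
    PySem.Chars.count.go [c] fuel cs acc = acc + cs.count c := by
  induction cs generalizing acc fuel with
  | nil => cases fuel <;> simp [PySem.Chars.count.go]
  | cons x t ih =>
    cases fuel with
    | zero => simp at h
    | succ f =>
      simp only [PySem.Chars.count.go, List.isPrefixOf, List.count_cons]
      by_cases hx : c = x
      · subst hx
        simp only [beq_self_eq_true, Bool.true_and]
        rw [if_pos trivial]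
        simp only [List.length_cons, List.length_nil, List.drop_succ_cons, List.drop_zero]
        rw [ih (acc + 1) f (by simpa using h)]
        simp; omega
      · have : (c == x) = false := by simp [hx]
        simp only [this, Bool.false_and, if_neg Bool.false_ne_true,
          ih acc f (by simpa using h)]
        simp [beq_iff_eq, Ne.symm hx]

theorem count_single (c : Char) (cs : List Char) :
    PySem.Chars.count cs [c] = cs.count c := by
  simp [PySem.Chars.count, count_go_single c cs 0 cs.length le_rfl]

-- single-character s.replace(c, ""): Chars.replace cs [c] [] filters c out
theorem replace_go_single (c : Char) (cs acc : List Char) (fuel : Nat)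
    (h : cs.length ≤ fuel) :
    PySem.Chars.replace.go [c] [] fuel cs acc
      = acc.reverse ++ cs.filter (fun x => !(x == c)) := by
  induction cs generalizing acc fuel with
  | nil => cases fuel <;> simp [PySem.Chars.replace.go]
  | cons x t ih =>
    cases fuel with
    | zero => simp at h
    | succ f =>
      simp only [PySem.Chars.replace.go, List.isPrefixOf, List.filter_cons]
      by_cases hx : c = x
      · subst hx
        simp only [beq_self_eq_true, Bool.true_and]
        rw [if_pos trivial]
        simp only [List.length_cons, List.length_nil, List.drop_succ_cons, List.drop_zero,
          List.reverse_nil, List.nil_append]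
        rw [ih acc f (by simpa using h)]
        simp
      · have : (c == x) = false := by simp [hx]
        have hxc : (x == c) = false := by simp [Ne.symm hx]
        simp only [this, Bool.false_and, if_neg Bool.false_ne_true,
          ih (x :: acc) f (by simpa using h), hxc, Bool.not_false]
        simp

theorem replace_single (c : Char) (cs : List Char) :
    PySem.Chars.replace cs [c] [] = cs.filter (fun x => !(x == c)) := by
  simp [PySem.Chars.replace, replace_go_single c cs [] cs.length le_rfl]

-- the dot-free string of a guarded input has exactly 12 characters
theorem noDots_length (cs : List Char)
    (hc : cs.count '.' = 2) (hl : cs.length = 14) :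
    (PySem.Chars.replace cs ['.'] []).length = 12 := by
  rw [replace_single, ← List.countP_eq_length_filter]
  have h := List.length_eq_countP_add_countP (fun x => x == '.') (l := cs)
  have hnot : (fun a : Char => decide (¬ (a == '.') = true)) = (fun a : Char => !(a == '.')) := by
    funext a; by_cases h : (a == '.') = true <;> simp [h]
  rw [hnot] at h
  have hcnt : cs.countP (fun x => x == '.') = 2 := by
    simpa [List.count] using hc
  omega

-- loop vs pair-join on any 12-character list
theorem core_eq (d : List Char) (hd : d.length = 12) :
    convertMacLoopA d 1
      = PySem.Chars.join [':']
          ((PySem.List.pyRange 0 (d.length : Int) 2).map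
            (fun i => PySem.List.slice d (some i) (some (i + 2)))) := by
  match d, hd with
  | [a0,a1,a2,a3,a4,a5,a6,a7,a8,a9,a10,a11], _ =>
    simp [convertMacLoopA, PySem.List.insert, PySem.List.pyRange,
      PySem.List.slice, PySem.List.clampIdx, PySem.Chars.join,
      PySem.List.sliceIndices, List.range_succ,
      List.intercalate, List.intersperse]

-- ===== VERDICT (by name: the statement is the Claim_ definition above) =====
theorem convert_mac_spec : Claim_equal_convert_mac := by
  intro mac _
  unfold Spec_convert_mac convert_mac convert_mac_alt
  by_cases hg : PySem.Chars.count (PySem.Chars.slice mac.toList (some 0)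
      (some (mac.toList.length : Int))) ['.'] = 2 ∧ mac.toList.length = 14
  · simp only [hg]
    obtain ⟨hc, hl⟩ := hg
    have hslice : PySem.Chars.slice mac.toList (some 0) (some (mac.toList.length : Int))
        = mac.toList := by simp [pysem]
    rw [hslice, count_single] at hc
    rw [core_eq _ (noDots_length mac.toList hc hl)]
  · simp only [if_neg hg]
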